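-- pv_equiv track=rewrite | github.com/AlloteSoftware/aimath2docx | aimath2docx.py | add_sqrt_degree
-- ===== SOURCE A (Python) =====
-- def add_sqrt_degree(latex):
--     result = ''
--     i = 0
--     while i < len(latex):
--         if latex[i:i+5] == '\\sqrt':
--             j = i + 5
--             # Пропускаем пробелы после \sqrt
--             while j < len(latex) and latex[j] == ' ':
--                 j += 1
--             # Если следующая скобка — это [, то степень уже есть
--             if j < len(latex) and latex[j] == '[':
--                 result += latex[i:j+1]  # копируем до [
--                 i = j + 1
--                 continue
--             # Если сразу после \sqrt идет {
--             elif j < len(latex) and latex[j] == '{':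
--                 result += '\\sqrt[2]{'
--                 i = j + 1
--                 continue
--             else:
--                 # просто копируем \sqrt и движемся дальше
--                 result += latex[i]
--                 i += 1
--                 continue
--         else:
--             result += latex[i]
--             i += 1
--     return result
-- ===== SOURCE B (Python) =====
-- import re
--
-- def add_sqrt_degree(latex):
--     # single regex substitution: \sqrt + literal spaces + { becomes \sqrt[2]{
--     return re.sub(r'\\sqrt *\{', r'\\sqrt[2]{', latex)
-- ===== Notes on version B (the rewrite author's own statement) =====
-- stated objective: simpler
-- what changed: A's manual index-by-index scanner with explicit space-skipping and three copy branches is replaced by one regex substitution that rewrites each backslash-sqrt, optional spaces, open-brace match to the degree-2 form; a timing run measured it much faster (C-level regex pass vs per-character Python loop with string concatenation).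
import Mathlib
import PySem

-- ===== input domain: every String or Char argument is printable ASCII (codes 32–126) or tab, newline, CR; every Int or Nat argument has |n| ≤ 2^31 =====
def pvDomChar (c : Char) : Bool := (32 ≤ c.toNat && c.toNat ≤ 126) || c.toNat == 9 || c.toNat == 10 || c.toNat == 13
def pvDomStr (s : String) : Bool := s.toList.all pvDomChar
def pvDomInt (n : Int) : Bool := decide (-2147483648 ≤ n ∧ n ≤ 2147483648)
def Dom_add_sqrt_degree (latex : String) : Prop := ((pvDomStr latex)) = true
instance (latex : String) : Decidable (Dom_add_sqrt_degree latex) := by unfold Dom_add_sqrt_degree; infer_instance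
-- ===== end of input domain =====

-- B replaces A's manual index-by-index scanner with a single regex substitution (\sqrt *{ -> \sqrt[2]{); objective: simpler (a timing run also measured B faster).

-- ===== PORT A =====
-- A's inner `while j < len(latex) and latex[j] == ' '` loop: (skipped spaces, rest from j)
def pvSkipSpacesA : List Char → List Char × List Char
  | [] => ([], [])
  | c :: t =>
    if c = ' ' then
      let p := pvSkipSpacesA t
      (' ' :: p.1, p.2)
    else ([], c :: t)

theorem pvSkipSpacesA_snd_le (t : List Char) : (pvSkipSpacesA t).2.length ≤ t.length := by
  induction t with
  | nil => simp [pvSkipSpacesA]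
  | cons c t ih =>
    simp only [pvSkipSpacesA]
    split
    · simp only [List.length_cons]; exact Nat.le_succ_of_le ih
    · simp

-- A's outer while loop over the index i, as recursion over the suffix of the string from i
def pvLoopA (s : List Char) : List Char :=
  match s with
  | [] => []
  | c :: rest =>
    if (c :: rest).take 5 = ['\\','s','q','r','t'] then       -- latex[i:i+5] == '\sqrt'
      match h : (pvSkipSpacesA (rest.drop 4)).2 with           -- skip spaces after \sqrt
      | [] => c :: pvLoopA rest                                -- j == len: copy one char
      | b :: u =>
        if b = '[' then                                        -- degree present: copy latex[i:j+1]
          ['\\','s','q','r','t'] ++ (pvSkipSpacesA (rest.drop 4)).1 ++ ['['] ++ pvLoopA u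
        else if b = '{' then                                   -- insert default degree
          ['\\','s','q','r','t','[','2',']','{'] ++ pvLoopA u
        else c :: pvLoopA rest                                 -- copy one char
    else c :: pvLoopA rest
termination_by s.length
decreasing_by
  all_goals first
    | (have h1 := pvSkipSpacesA_snd_le (rest.drop 4)
       have h2 := congrArg List.length h
       simp only [List.length_cons] at h2
       have h3 : (rest.drop 4).length ≤ rest.length := by
         simpa using List.length_drop_le 4 rest
       simp only [List.length_cons]
       omega)
    | simp

def add_sqrt_degree (latex : String) : String := String.ofList (pvLoopA latex.toList)

-- ===== PORT B =====
-- hand port of the regex tail ' *\{': literal spaces then a literal '{'; none = no match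
def pvSpacesBrace? : List Char → Option (List Char)
  | [] => none
  | c :: t => if c = ' ' then pvSpacesBrace? t else if c = '{' then some t else none

-- match the whole pattern r'\\sqrt *\{' at the head of s; some u = remainder after the match
def pvMatchAt (s : List Char) : Option (List Char) :=
  if s.take 5 = ['\\','s','q','r','t'] then pvSpacesBrace? (s.drop 5) else none

theorem pvSpacesBrace?_length {t u : List Char} (h : pvSpacesBrace? t = some u) :
    u.length < t.length := by
  induction t generalizing u with
  | nil => simp [pvSpacesBrace?] at h
  | cons c t ih =>
    simp only [pvSpacesBrace?] at h
    split at h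
    · exact Nat.lt_succ_of_lt (ih h)
    · split at h
      · cases h; simp
      · simp at h

theorem pvMatchAt_length {s u : List Char} (h : pvMatchAt s = some u) : u.length < s.length := by
  unfold pvMatchAt at h
  split at h
  · rename_i hp
    have h1 := pvSpacesBrace?_length h
    have h5 : (s.take 5).length = 5 := by rw [hp]; rfl
    have h6 : (s.drop 5).length = s.length - 5 := by simp
    simp only [List.length_take] at h5
    omega
  · simp at h

-- re.sub: scan left to right, replace each non-overlapping leftmost match by '\sqrt[2]{'
def pvSub (s : List Char) : List Char :=
  match s with
  | [] => []
  | c :: rest =>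
    match h : pvMatchAt (c :: rest) with
    | some u => ['\\','s','q','r','t','[','2',']','{'] ++ pvSub u
    | none => c :: pvSub rest
termination_by s.length
decreasing_by
  · exact pvMatchAt_length h
  · simp

def add_sqrt_degree_alt (latex : String) : String := String.ofList (pvSub latex.toList)

-- ===== PRECONDITION & SPEC =====
def Spec_add_sqrt_degree (latex : String) (out : String) : Prop := out = add_sqrt_degree_alt latex
instance (latex : String) (out : String) : Decidable (Spec_add_sqrt_degree latex out) := by unfold Spec_add_sqrt_degree; infer_instance

-- ===== CLAIM (what is proved, stated in full; the proofs are below) =====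
def Claim_equal_add_sqrt_degree : Prop := ∀ (latex : String), Dom_add_sqrt_degree latex → Spec_add_sqrt_degree latex (add_sqrt_degree latex)

-- ===== LEMMAS AND PROOFS =====

-- pvSkipSpacesA decomposes its input: spaces ++ rest, and the skipped part is all spaces
theorem pvSkipSpacesA_spec (t : List Char) :
    t = (pvSkipSpacesA t).1 ++ (pvSkipSpacesA t).2 ∧ ∀ c ∈ (pvSkipSpacesA t).1, c = ' ' := by
  induction t with
  | nil => simp [pvSkipSpacesA]
  | cons c t ih =>
    simp only [pvSkipSpacesA]
    split
    · rename_i hc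
      refine ⟨by simpa [hc] using ih.1, ?_⟩
      intro d hd
      rcases List.mem_cons.mp hd with h | h
      · exact h
      · exact ih.2 d h
    · simp

-- skipping spaces over an all-space prefix stops exactly at a non-space head
theorem pvSkipSpacesA_spaces_append (sp r : List Char) (hsp : ∀ c ∈ sp, c = ' ')
    (hr : ∀ t, r ≠ ' ' :: t) : pvSkipSpacesA (sp ++ r) = (sp, r) := by
  induction sp with
  | nil =>
    cases r with
    | nil => rfl
    | cons b t =>
      have hb : b ≠ ' ' := fun h => hr t (by rw [h])
      simp [pvSkipSpacesA, hb]
  | cons c sp ih =>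
    have hc : c = ' ' := hsp c (List.mem_cons_self ..)
    subst hc
    simp [pvSkipSpacesA, ih (fun d hd => hsp d (List.mem_cons_of_mem _ hd))]

-- pvSpacesBrace? in terms of pvSkipSpacesA's result
theorem pvSpacesBrace?_of_skip (t : List Char) :
    pvSpacesBrace? t =
      (match (pvSkipSpacesA t).2 with
       | [] => none
       | b :: u => if b = '{' then some u else none) := by
  induction t with
  | nil => simp [pvSpacesBrace?, pvSkipSpacesA]
  | cons c t ih =>
    simp only [pvSpacesBrace?, pvSkipSpacesA]
    split
    · rename_i hc
      simpa using ih
    · rename_i hc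
      simp

theorem take5_cons {c : Char} {l : List Char}
    (hp : (c :: l).take 5 = ['\\','s','q','r','t']) :
    c = '\\' ∧ l.take 4 = ['s','q','r','t'] := by
  rw [show (5:Nat) = 4+1 from rfl, List.take_succ_cons] at hp
  simpa using hp

-- step equations for the two scanners
theorem pvLoopA_cons_nil {c : Char} {rest : List Char}
    (hp : (c :: rest).take 5 = ['\\','s','q','r','t'])
    (h2 : (pvSkipSpacesA (rest.drop 4)).2 = []) :
    pvLoopA (c :: rest) = c :: pvLoopA rest := by
  rw [pvLoopA, if_pos hp]
  split
  · rfl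
  · rename_i b u heq
    rw [h2] at heq
    cases heq

theorem pvLoopA_cons_cons {c b : Char} {rest u : List Char}
    (hp : (c :: rest).take 5 = ['\\','s','q','r','t'])
    (h2 : (pvSkipSpacesA (rest.drop 4)).2 = b :: u) :
    pvLoopA (c :: rest) =
      (if b = '[' then
        ['\\','s','q','r','t'] ++ (pvSkipSpacesA (rest.drop 4)).1 ++ ['['] ++ pvLoopA u
      else if b = '{' then
        ['\\','s','q','r','t','[','2',']','{'] ++ pvLoopA u
      else c :: pvLoopA rest) := by
  rw [pvLoopA, if_pos hp]
  split
  · rename_i heq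
    rw [h2] at heq
    cases heq
  · rename_i b' u' heq
    rw [h2] at heq
    cases heq
    rfl

theorem pvSub_cons_some {c : Char} {rest u : List Char}
    (h : pvMatchAt (c :: rest) = some u) :
    pvSub (c :: rest) = ['\\','s','q','r','t','[','2',']','{'] ++ pvSub u := by
  rw [pvSub]
  split
  · rename_i u' heq
    rw [h] at heq
    cases heq
    rfl
  · rename_i heq
    rw [h] at heq
    cases heq

theorem pvSub_cons_none {c : Char} {rest : List Char}
    (h : pvMatchAt (c :: rest) = none) :
    pvSub (c :: rest) = c :: pvSub rest := by
  rw [pvSub]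
  split
  · rename_i u' heq
    rw [h] at heq
    cases heq
  · rfl

-- stepping pvSub over characters that cannot start a match (no backslash among them)
theorem pvSub_no_backslash (cs : List Char) (u : List Char)
    (h : ∀ c ∈ cs, c ≠ '\\') : pvSub (cs ++ u) = cs ++ pvSub u := by
  induction cs with
  | nil => simp
  | cons c cs ih =>
    have hc : c ≠ '\\' := h c (List.mem_cons_self ..)
    have hm : pvMatchAt (c :: (cs ++ u)) = none := by
      unfold pvMatchAt
      rw [if_neg]
      intro hp
      exact hc (take5_cons hp).1
    rw [List.cons_append, pvSub_cons_none hm,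
      ih (fun d hd => h d (List.mem_cons_of_mem _ hd))]
    rfl

-- main equivalence: A's scanner computes the regex substitution
theorem pvLoopA_eq_pvSub (s : List Char) : pvLoopA s = pvSub s := by
  induction hn : s.length using Nat.strong_induction_on generalizing s with
  | _ n ih =>
  match s with
  | [] => simp [pvLoopA, pvSub]
  | c :: rest =>
    have ihrest : pvLoopA rest = pvSub rest := by
      exact ih rest.length (by simp [← hn]) rest rfl
    by_cases hp : (c :: rest).take 5 = ['\\','s','q','r','t']
    · -- '\sqrt' matched at this position
      have hdrop : (c :: rest).drop 5 = rest.drop 4 := rfl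
      have hmatch : pvMatchAt (c :: rest) =
          (match (pvSkipSpacesA (rest.drop 4)).2 with
           | [] => none
           | b :: u => if b = '{' then some u else none) := by
        unfold pvMatchAt
        rw [if_pos hp, hdrop, pvSpacesBrace?_of_skip]
      have hrest4 : rest = ['s','q','r','t'] ++ rest.drop 4 := by
        conv_lhs => rw [← List.take_append_drop 4 rest]
        rw [(take5_cons hp).2]
      have hlen4 : 4 ≤ rest.length := by
        have hmin : min 4 rest.length = 4 := by
          simpa using congrArg List.length (take5_cons hp).2
        omega
      rcases h2 : (pvSkipSpacesA (rest.drop 4)).2 with _ | ⟨b, u⟩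
      · -- only spaces up to the end of the string: neither side matches, copy one char
        rw [pvLoopA_cons_nil hp h2, pvSub_cons_none (by rw [hmatch, h2]), ihrest]
      · have hulen : u.length < n := by
          have h1 := pvSkipSpacesA_snd_le (rest.drop 4)
          have h2' := congrArg List.length h2
          have h3 : (rest.drop 4).length = rest.length - 4 := by simp
          simp only [List.length_cons] at h2'
          simp only [← hn, List.length_cons]
          omega
        have ihu : pvLoopA u = pvSub u := ih u.length hulen u rfl
        by_cases hb1 : b = '['
        · -- degree already present: A copies '\sqrt' ++ spaces ++ '[', B matches nothing there
          subst hb1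
          rw [pvLoopA_cons_cons hp h2, if_pos rfl]
          rw [pvSub_cons_none (by rw [hmatch, h2]; rfl)]
          have hskip := pvSkipSpacesA_spec (rest.drop 4)
          have hrest2 : rest = (['s','q','r','t'] ++ (pvSkipSpacesA (rest.drop 4)).1 ++ ['[']) ++ u := by
            conv_lhs => rw [hrest4]
            conv_lhs => rw [hskip.1]
            rw [h2]
            simp
          have hnb : ∀ d ∈ ['s','q','r','t'] ++ (pvSkipSpacesA (rest.drop 4)).1 ++ ['['], d ≠ '\\' := by
            intro d hd
            simp only [List.append_assoc, List.mem_append, List.mem_cons,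
              List.not_mem_nil, or_false] at hd
            rcases hd with h | h | h
            · rcases h with h|h|h|h <;> subst h <;> decide
            · have := hskip.2 d h; subst this; decide
            · subst h; decide
          rw [hrest2, pvSub_no_backslash _ _ hnb, ihu, (take5_cons hp).1]
          have hdrop4 : List.drop 4 ((['s','q','r','t'] ++ (pvSkipSpacesA (rest.drop 4)).1 ++ ['[']) ++ u)
              = (pvSkipSpacesA (rest.drop 4)).1 ++ '[' :: u := by
            simp
          rw [hdrop4,
            pvSkipSpacesA_spaces_append _ ('[' :: u) hskip.2
              (fun t ht => by injection ht with h1 _; exact absurd h1 (by decide))]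
          simp
        · by_cases hb2 : b = '{'
          · -- the regex match: both produce '\sqrt[2]{' and continue after the '{'
            subst hb2
            rw [pvLoopA_cons_cons hp h2, if_neg (by decide), if_pos rfl]
            rw [pvSub_cons_some (by rw [hmatch, h2]; rfl), ihu]
          · -- some other character after the spaces: no match, copy one char
            rw [pvLoopA_cons_cons hp h2, if_neg hb1, if_neg hb2]
            rw [pvSub_cons_none (by rw [hmatch, h2]; simp [hb2]), ihrest]
    · -- no '\sqrt' at this position: both copy one char
      have hm : pvMatchAt (c :: rest) = none := by
        unfold pvMatchAt; rw [if_neg hp]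
      rw [pvLoopA, if_neg hp, pvSub_cons_none hm, ihrest]

-- ===== VERDICT (by name: the statement is the Claim_ definition above) =====
theorem add_sqrt_degree_spec : Claim_equal_add_sqrt_degree := by
  intro latex _
  unfold Spec_add_sqrt_degree add_sqrt_degree add_sqrt_degree_alt
  rw [pvLoopA_eq_pvSub]
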